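-- pv_equiv track=rewrite | github.com/MCDwyer/mario_bc | GymEnvs/retro_env_wrapper.py | map_to_retro_action
-- ===== SOURCE A (Python) =====
-- SHIFT_INDEX = 0
--
-- LEFT_INDEX = 6
--
-- RIGHT_INDEX = 7
--
-- UP_INDEX = 4
--
-- DOWN_INDEX = 5
--
-- JUMP_INDEX = 8
--
-- NO_ACTION = 12
--
-- def map_to_retro_action(action):
--     # this is to map from discrete action space to the retro env space, including the multi-press button options
--
--     binary_action = [False]*9 # retro_env action space size
--
--     action_mapping = {
--         0: [UP_INDEX],
--         1: [DOWN_INDEX],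
--         2: [LEFT_INDEX],
--         3: [RIGHT_INDEX],
--         4: [JUMP_INDEX],
--         5: [SHIFT_INDEX],
--         6: [LEFT_INDEX, JUMP_INDEX],
--         7: [RIGHT_INDEX, JUMP_INDEX],
--         8: [LEFT_INDEX, SHIFT_INDEX],
--         9: [RIGHT_INDEX, SHIFT_INDEX],
--         10: [LEFT_INDEX, SHIFT_INDEX, JUMP_INDEX],
--         11: [RIGHT_INDEX, SHIFT_INDEX, JUMP_INDEX],
--         12: [NO_ACTION]
--         }
--
--     if action == NO_ACTION:
--         return binary_action
--     else:
--         for index in action_mapping[int(action)]: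
--             binary_action[int(index)] = True
--
--     return binary_action
-- ===== SOURCE B (Python) =====
-- _ACTION_TABLE = {
--     0:  [False, False, False, False, True,  False, False, False, False],
--     1:  [False, False, False, False, False, True,  False, False, False],
--     2:  [False, False, False, False, False, False, True,  False, False],
--     3:  [False, False, False, False, False, False, False, True,  False],
--     4:  [False, False, False, False, False, False, False, False, True ],
--     5:  [True,  False, False, False, False, False, False, False, False],
--     6:  [False, False, False, False, False, False, True,  False, True ],
--     7:  [False, False, False, False, False, False, False, True,  True ],
--     8:  [True,  False, False, False, False, False, True,  False, False],
--     9:  [True,  False, False, False, False, False, False, True,  False],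
--     10: [True,  False, False, False, False, False, True,  False, True ],
--     11: [True,  False, False, False, False, False, False, True,  True ],
--     12: [False, False, False, False, False, False, False, False, False],
-- }
--
-- def map_to_retro_action(action):
--     return list(_ACTION_TABLE[int(action)])
-- ===== Notes on version B (the rewrite author's own statement) =====
-- stated objective: simpler
-- what changed: B replaces A's build-a-False-array-then-flip-indices loop and the special no-op branch with a single precomputed table mapping each valid discrete action directly to its full nine-element boolean array, returning a fresh copy.
import Mathlib
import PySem

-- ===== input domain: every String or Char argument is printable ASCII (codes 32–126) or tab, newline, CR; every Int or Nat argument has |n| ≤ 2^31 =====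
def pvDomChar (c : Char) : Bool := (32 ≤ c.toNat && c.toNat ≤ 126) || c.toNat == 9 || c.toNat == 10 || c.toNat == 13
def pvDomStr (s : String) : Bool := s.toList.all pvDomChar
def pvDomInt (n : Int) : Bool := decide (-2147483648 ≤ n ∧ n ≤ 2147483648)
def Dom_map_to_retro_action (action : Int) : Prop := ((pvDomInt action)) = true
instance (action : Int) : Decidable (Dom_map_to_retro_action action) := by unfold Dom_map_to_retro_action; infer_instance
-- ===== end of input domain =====

-- B replaces A's build-then-flip-indices loop and special NO_ACTION branch with one
-- precomputed action→array table; objective: simpler. No speed claim.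

-- ===== PORT A =====
-- module-level constants of Source A
def SHIFT_INDEX : Int := 0
def LEFT_INDEX : Int := 6
def RIGHT_INDEX : Int := 7
def UP_INDEX : Int := 4
def DOWN_INDEX : Int := 5
def JUMP_INDEX : Int := 8
def NO_ACTION : Int := 12

def pvActionMapping : PySem.Dict Int (List Int) :=
  PySem.Dict.ofList [(0, [UP_INDEX]), (1, [DOWN_INDEX]), (2, [LEFT_INDEX]), (3, [RIGHT_INDEX]),
   (4, [JUMP_INDEX]), (5, [SHIFT_INDEX]), (6, [LEFT_INDEX, JUMP_INDEX]),
   (7, [RIGHT_INDEX, JUMP_INDEX]), (8, [LEFT_INDEX, SHIFT_INDEX]),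
   (9, [RIGHT_INDEX, SHIFT_INDEX]), (10, [LEFT_INDEX, SHIFT_INDEX, JUMP_INDEX]),
   (11, [RIGHT_INDEX, SHIFT_INDEX, JUMP_INDEX]), (12, [NO_ACTION])]

-- action_mapping[int(action)] raises KeyError outside 0..12 — excluded by Pre_;
-- the index assignment is in range whenever the lookup succeeds, pySetD is exact there.
def map_to_retro_action (action : Int) : List Bool :=
  let binary_action : List Bool := List.replicate 9 false
  if action == NO_ACTION then binary_action
  else
    ((PySem.Dict.get? pvActionMapping action).getD []).foldl
      (fun ba index => PySem.List.pySetD ba index true) binary_action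

-- ===== PORT B =====
def pvActionTable : PySem.Dict Int (List Bool) :=
  PySem.Dict.ofList [(0,  [false, false, false, false, true,  false, false, false, false]),
   (1,  [false, false, false, false, false, true,  false, false, false]),
   (2,  [false, false, false, false, false, false, true,  false, false]),
   (3,  [false, false, false, false, false, false, false, true,  false]),
   (4,  [false, false, false, false, false, false, false, false, true ]),
   (5,  [true,  false, false, false, false, false, false, false, false]),
   (6,  [false, false, false, false, false, false, true,  false, true ]),
   (7,  [false, false, false, false, false, false, false, true,  true ]),
   (8,  [true,  false, false, false, false, false, true,  false, false]),
   (9,  [true,  false, false, false, false, false, false, true,  false]),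
   (10, [true,  false, false, false, false, false, true,  false, true ]),
   (11, [true,  false, false, false, false, false, false, true,  true ]),
   (12, [false, false, false, false, false, false, false, false, false])]

def map_to_retro_action_alt (action : Int) : List Bool :=
  (PySem.Dict.get? pvActionTable action).getD []

-- ===== PRECONDITION & SPEC =====
-- A raises KeyError on any action outside the valid discrete range (and so does B); exactly those are excluded.
def Pre_map_to_retro_action (action : Int) : Prop := 0 ≤ action ∧ action ≤ 12
instance (action : Int) : Decidable (Pre_map_to_retro_action action) := by unfold Pre_map_to_retro_action; infer_instance
def pvWitness_map_to_retro_action : Int := (7)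
def Spec_map_to_retro_action (action : Int) (out : List Bool) : Prop := out = map_to_retro_action_alt action
instance (action : Int) (out : List Bool) : Decidable (Spec_map_to_retro_action action out) := by unfold Spec_map_to_retro_action; infer_instance

-- ===== CLAIM (what is proved, stated in full; the proofs are below) =====
def Claim_equal_map_to_retro_action : Prop := ∀ (action : Int), Dom_map_to_retro_action action → Pre_map_to_retro_action action → Spec_map_to_retro_action action (map_to_retro_action action)

-- ===== LEMMAS AND PROOFS =====

-- ===== VERDICT (by name: the statement is the Claim_ definition above) =====
theorem map_to_retro_action_spec : Claim_equal_map_to_retro_action := by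
  intro action _ hp
  unfold Spec_map_to_retro_action
  obtain ⟨h0, h12⟩ := hp
  interval_cases action <;> decide
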